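-- pv_equiv track=rewrite | github.com/abefrandsen/codevent19 | p13/p13.py | _parse_opcode
-- ===== SOURCE A (Python) =====
-- def _parse_opcode(opcode):
--     """
--     Parse an opcode, getting the parameter modes and instruction.
--     Opcode should be input as integer.
--     """
--     code = str(opcode)
--     l = len(code)
--     inst = int(code[-2:])
--     modes = []
--     for i in range(l-2):
--         modes.append(int(code[l-3-i]))
--     return inst, modes
-- ===== SOURCE B (Python) =====
-- def _parse_opcode(opcode):
--     """
--     Parse an opcode, getting the parameter modes and instruction.
--     Opcode should be input as integer.
--     """
--     inst = opcode % 100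
--     modes = []
--     rest = opcode // 100
--     while rest > 0:
--         modes.append(rest % 10)
--         rest //= 10
--     return inst, modes
-- ===== Notes on version B (the rewrite author's own statement) =====
-- stated objective: idiomatic
-- what changed: Replaces str()/len/character-slicing digit extraction with pure integer arithmetic: inst = opcode % 100 and a while-loop peeling mode digits with rest % 10, rest //= 10.
-- outside the precondition, e.g. on _parse_opcode(-5): A returns (-5, []), B returns (95, []); on _parse_opcode(-12): A raises ValueError, B returns (88, [])
import Mathlib
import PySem

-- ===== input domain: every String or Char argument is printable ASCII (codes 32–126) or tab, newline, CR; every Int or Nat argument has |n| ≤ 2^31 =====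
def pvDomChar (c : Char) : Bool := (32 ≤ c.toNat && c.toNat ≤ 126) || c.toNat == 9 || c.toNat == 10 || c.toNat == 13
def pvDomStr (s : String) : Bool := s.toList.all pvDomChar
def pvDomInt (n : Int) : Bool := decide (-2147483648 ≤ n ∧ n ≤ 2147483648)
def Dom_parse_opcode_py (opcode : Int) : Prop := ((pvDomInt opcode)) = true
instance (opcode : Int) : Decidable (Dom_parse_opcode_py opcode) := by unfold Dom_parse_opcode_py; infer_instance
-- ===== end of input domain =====

-- B replaces A's str()/slicing digit extraction by pure integer arithmetic (opcode % 100 and a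
-- digit-peeling loop); equivalence is claimed for nonnegative opcodes (Pre_), return value only.

-- ===== PORT A =====
-- str(opcode) ported through the List Char side (PySem.Int.toChars = str); int(...) is
-- PySem.Int.ofChars?, none exactly where Python raises ValueError; the .getD 0 / '0' defaults are
-- unreachable under Pre_ (all sliced/indexed characters are decimal digits of a nonnegative int).
def parse_opcode_py (opcode : Int) : Int × List Int :=
  let code : List Char := PySem.Int.toChars opcode
  let l : Int := code.length
  let inst : Int := (PySem.Int.ofChars? (PySem.List.slice code (some (-2)) none)).getD 0
  let modes : List Int :=
    (PySem.List.pyRange 0 (l - 2) 1).foldl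
      (fun acc i => acc ++ [(PySem.Int.ofChars? [PySem.List.pyGetD code (l - 3 - i) '0']).getD 0]) []
  (inst, modes)

-- ===== PORT B =====
-- the 'while rest > 0' loop of Source B
def pvBLoop (rest : Int) (modes : List Int) : List Int :=
  if 0 < rest then
    pvBLoop (PySem.Int.floordiv rest 10) (modes ++ [PySem.Int.mod rest 10])
  else modes
termination_by rest.toNat
decreasing_by
  rename_i h
  rw [PySem.Int.floordiv_eq_ediv_of_pos (by omega : (0:Int) < 10)]
  omega

def parse_opcode_py_alt (opcode : Int) : Int × List Int :=
  (PySem.Int.mod opcode 100, pvBLoop (PySem.Int.floordiv opcode 100) [])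

-- ===== PRECONDITION & SPEC =====
-- Pre_ excludes negative opcodes: on most of them A raises ValueError (int() sees the '-' sign as a
-- lone character), and on single-digit negatives A's sign-carrying slice accidentally returns the
-- opcode itself with no modes, a value that is not a mode decomposition and that B's floor
-- arithmetic has no reason to reproduce.
def Pre_parse_opcode_py (opcode : Int) : Prop := 0 ≤ opcode
instance (opcode : Int) : Decidable (Pre_parse_opcode_py opcode) := by unfold Pre_parse_opcode_py; infer_instance
def pvWitness_parse_opcode_py : Int := (1002)

def Spec_parse_opcode_py (opcode : Int) (out : Int × List Int) : Prop := out = parse_opcode_py_alt opcode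
instance (opcode : Int) (out : Int × List Int) : Decidable (Spec_parse_opcode_py opcode out) := by unfold Spec_parse_opcode_py; infer_instance

-- ===== CLAIM (what is proved, stated in full; the proofs are below) =====
def Claim_equal_parse_opcode_py : Prop := ∀ (opcode : Int), Dom_parse_opcode_py opcode → Pre_parse_opcode_py opcode → Spec_parse_opcode_py opcode (parse_opcode_py opcode)

-- ===== LEMMAS AND PROOFS =====

-- int() of one decimal digit character
lemma pvOneDigit (b : Nat) (hb : b < 10) :
    (PySem.Int.ofChars? [b.digitChar]).getD 0 = (b : Int) := by
  interval_cases b <;> decide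

-- int() of two decimal digit characters
lemma pvTwoDigit (a b : Nat) (ha : a < 10) (hb : b < 10) :
    (PySem.Int.ofChars? [a.digitChar, b.digitChar]).getD 0 = ((10 * a + b : Nat) : Int) := by
  interval_cases a <;> interval_cases b <;> decide

lemma pvToDigits_ge100 (n : Nat) (h : 100 ≤ n) :
    Nat.toDigits 10 n = Nat.toDigits 10 (n / 100) ++ [(n / 10 % 10).digitChar, (n % 10).digitChar] := by
  rw [Nat.toDigits_eq_if (by omega) (n := n), if_neg (by omega),
      Nat.toDigits_eq_if (by omega) (n := n / 10), if_neg (by omega : ¬ n / 10 < 10),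
      Nat.div_div_eq_div_mul]
  simp

-- the last-two-characters slice parses to n % 100
lemma pvInstEq (n : Nat) :
    (PySem.Int.ofChars? ((Nat.toDigits 10 n).drop ((Nat.toDigits 10 n).length - 2))).getD 0
      = ((n % 100 : Nat) : Int) := by
  rcases lt_or_ge n 10 with h10 | h10
  · rw [Nat.toDigits_of_lt_base (by omega)]
    have : n % 100 = n := Nat.mod_eq_of_lt (by omega)
    rw [this]
    simpa using pvOneDigit n h10
  rcases lt_or_ge n 100 with h100 | h100
  · rw [Nat.toDigits_eq_if (by omega) (n := n), if_neg (by omega),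
      Nat.toDigits_of_lt_base (by omega : n / 10 < 10)]
    have hm : n % 100 = 10 * (n / 10) + n % 10 := by omega
    rw [hm]
    simpa using pvTwoDigit (n / 10) (n % 10) (by omega) (by omega)
  · rw [pvToDigits_ge100 n h100]
    have hlen : (Nat.toDigits 10 (n / 100) ++ [(n / 10 % 10).digitChar, (n % 10).digitChar]).length
        = (Nat.toDigits 10 (n / 100)).length + 2 := by simp
    rw [hlen, Nat.add_sub_cancel]
    rw [List.drop_left]
    have hm : n % 100 = 10 * (n / 10 % 10) + n % 10 := by omega
    rw [hm]
    exact pvTwoDigit (n / 10 % 10) (n % 10) (by omega) (by omega)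

-- A's index loop reads the reversed prefix
lemma pvMapRev (g : Char → Int) (d : Char) (cs : List Char) (m : Nat) (hm : m ≤ cs.length) :
    (PySem.List.pyRange 0 (m : Int) 1).map (fun i => g (PySem.List.pyGetD cs ((m : Int) - 1 - i) d))
      = ((cs.take m).reverse).map g := by
  rw [PySem.List.pyRange_one]
  simp only [sub_zero, Int.toNat_natCast, List.map_map]
  apply List.ext_getElem
  · simp [hm]
  intro j h1 h2
  simp only [List.getElem_map, List.getElem_range, Function.comp_apply, List.getElem_reverse,
    List.getElem_take]
  have hj : j < m := by simpa using h1
  have hidx : (m : Int) - 1 - (0 + (j : Int)) = ((m - 1 - j : Nat) : Int) := by omega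
  rw [hidx, PySem.List.pyGetD_natCast]
  have hlt : m - 1 - j < cs.length := by omega
  have hlen : (cs.take m).length = m := by simpa using hm
  congr 1
  simp [hlt, hlen]

-- B's loop computes the little-endian digits = reversed toDigits
lemma pvBLoopEq (m : Nat) (hm : 0 < m) (acc : List Int) :
    pvBLoop (m : Int) acc
      = acc ++ ((Nat.toDigits 10 m).reverse.map (fun c => (PySem.Int.ofChars? [c]).getD 0)) := by
  induction m using Nat.strong_induction_on generalizing acc with
  | _ m ih =>
    have hfd : PySem.Int.floordiv (m : Int) 10 = ((m / 10 : Nat) : Int) := by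
      exact_mod_cast PySem.Int.floordiv_natCast m 10
    have hmd : PySem.Int.mod (m : Int) 10 = ((m % 10 : Nat) : Int) := by
      exact_mod_cast PySem.Int.mod_natCast m 10
    rw [pvBLoop, if_pos (by exact_mod_cast hm), hfd, hmd]
    rcases lt_or_ge m 10 with h10 | h10
    · have h0 : m / 10 = 0 := by omega
      have hmod : m % 10 = m := Nat.mod_eq_of_lt h10
      rw [h0, hmod, pvBLoop, if_neg (by omega), Nat.toDigits_of_lt_base (by omega)]
      simp [pvOneDigit m h10]
    · rw [ih (m / 10) (by omega) (by omega),
        Nat.toDigits_eq_if (by omega) (n := m), if_neg (by omega)]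
      simp [pvOneDigit (m % 10) (by omega)]

-- ===== VERDICT (by name: the statement is the Claim_ definition above) =====
theorem parse_opcode_py_spec : Claim_equal_parse_opcode_py := by
  intro opcode _ hpre
  unfold Spec_parse_opcode_py parse_opcode_py parse_opcode_py_alt
  obtain ⟨n, rfl⟩ : ∃ n : Nat, opcode = (n : Int) := ⟨opcode.toNat, (Int.toNat_of_nonneg hpre).symm⟩
  have hcode : PySem.Int.toChars (n : Int) = Nat.toDigits 10 n := by
    simp [PySem.Int.toChars]
  simp only [hcode]
  have hlen1 : 0 < (Nat.toDigits 10 n).length := Nat.length_toDigits_pos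
  rw [Prod.mk.injEq]
  constructor
  · -- instruction
    rw [PySem.List.slice_from_neg_ofNat (Nat.toDigits 10 n) 2 (by omega)]
    have hmd : PySem.Int.mod (n : Int) 100 = ((n % 100 : Nat) : Int) := by
      exact_mod_cast PySem.Int.mod_natCast n 100
    rw [hmd]
    exact pvInstEq n
  · -- modes
    rw [PySem.List.foldl_append_singleton_eq_map, List.nil_append]
    have hfd : PySem.Int.floordiv (n : Int) 100 = ((n / 100 : Nat) : Int) := by
      exact_mod_cast PySem.Int.floordiv_natCast n 100
    rw [hfd]
    rcases lt_or_ge n 100 with h100 | h100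
    · have hl2 : (Nat.toDigits 10 n).length ≤ 2 := by
        rw [Nat.length_toDigits_le_iff (by omega) (by omega)]; omega
      rw [PySem.List.pyRange_one_eq_nil (by push_cast; omega)]
      have h0 : n / 100 = 0 := by omega
      rw [h0, pvBLoop, if_neg (by omega)]
      simp
    · have hsplit := pvToDigits_ge100 n h100
      have hm : 0 < n / 100 := by omega
      rw [pvBLoopEq (n / 100) hm [], List.nil_append, hsplit]
      generalize Nat.toDigits 10 (n / 100) = xs
      set c1 := (n / 10 % 10).digitChar
      set c0 := (n % 10).digitChar
      have hrange : ((xs ++ [c1, c0]).length : Int) - 2 = (xs.length : Int) := by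
        simp
      have harg : ∀ i : Int, ((xs ++ [c1, c0]).length : Int) - 3 - i = (xs.length : Int) - 1 - i := by
        intro i
        simp only [List.length_append, List.length_cons, List.length_nil]
        omega
      rw [hrange]
      calc (PySem.List.pyRange 0 ((xs.length : Int)) 1).map
              (fun i => (PySem.Int.ofChars? [PySem.List.pyGetD (xs ++ [c1, c0]) (((xs ++ [c1, c0]).length : Int) - 3 - i) '0']).getD 0)
          = (PySem.List.pyRange 0 ((xs.length : Int)) 1).map
              (fun i => (PySem.Int.ofChars? [PySem.List.pyGetD (xs ++ [c1, c0]) ((xs.length : Int) - 1 - i) '0']).getD 0) :=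
            List.map_congr_left (fun i _ => by rw [harg i])
        _ = (((xs ++ [c1, c0]).take xs.length).reverse).map (fun c => (PySem.Int.ofChars? [c]).getD 0) :=
            pvMapRev (fun c => (PySem.Int.ofChars? [c]).getD 0) '0' (xs ++ [c1, c0]) xs.length (by simp)
        _ = xs.reverse.map (fun c => (PySem.Int.ofChars? [c]).getD 0) := by
            rw [List.take_left]
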